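-- pv_equiv track=rewrite | github.com/dustinbowers/advent-of-code | 2025/day09_movie_theater/main.py | part2
-- ===== SOURCE A (Python) =====
-- import itertools
--
-- def part2(points):
--     pairs = list(itertools.combinations(points, 2))
--     max_area = 0
--     for pair in pairs:
--         a, b = tuple(pair[0]), tuple(pair[1])
--
--         # skip backwards pairs
--         if a > b:
--             continue
--
--         # pre-calculate edges
--         left_edge = min(a[0], b[0])
--         right_edge = max(a[0], b[0])
--         top_edge = min(a[1], b[1])
--         bottom_edge = max(a[1], b[1])
--
--         # look for intersecting lines
--         for i in range(len(points)):
--             point_one = points[i]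
--             point_two = points[(i+1) % len(points)]
--
--             # skip backwards points
--             if tuple(point_one) > tuple(point_two):
--                 continue
--
--             # break if intersecting line is found
--             if not (
--                     max(point_one[0], point_two[0]) <= left_edge or
--                     right_edge <= min(point_one[0], point_two[0]) or
--                     max(point_one[1], point_two[1]) <= top_edge or
--                     bottom_edge <= min(point_one[1], point_two[1])):
--                 break
--         else:
--             # save largest area of unobstructed box
--             area = (abs(a[0] - b[0])+1) * (abs(a[1] - b[1])+1)
--             max_area = max(max_area, area)
--     return max_area
-- ===== SOURCE B (Python) =====
-- def part2(points):
--     n = len(points)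
--     # build all candidate rectangles once (edge-major filtering below, instead of a per-pair edge scan)
--     rects = []
--     for i, a0 in enumerate(points):
--         a = tuple(a0)
--         for b0 in points[i + 1:]:
--             b = tuple(b0)
--             if not a > b:
--                 rects.append((min(a[0], b[0]), max(a[0], b[0]),
--                               min(a[1], b[1]), max(a[1], b[1]),
--                               (abs(a[0] - b[0]) + 1) * (abs(a[1] - b[1]) + 1)))
--     if not rects:
--         return 0
--     # each polygon edge eliminates every candidate it crosses
--     for i in range(n):
--         p = tuple(points[i])
--         q = tuple(points[(i + 1) % n])
--         if p > q:
--             continue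
--         x1, x2 = min(p[0], q[0]), max(p[0], q[0])
--         y1, y2 = min(p[1], q[1]), max(p[1], q[1])
--         rects = [r for r in rects
--                  if x2 <= r[0] or r[1] <= x1 or y2 <= r[2] or r[3] <= y1]
--     return max((r[4] for r in rects), default=0)
-- ===== Notes on version B (the rewrite author's own statement) =====
-- stated objective: faster
-- what changed: Loop nesting is inverted: B builds the candidate-rectangle list once and lets each polygon edge filter the surviving candidates (so each edge is processed once against a shrinking set), instead of A's per-pair rescan of all edges with a for-else break.
-- outside the precondition, e.g. on part2([[0, 0], [5, 5], [-1]]): A returns 0, B raises IndexError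
import Mathlib
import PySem

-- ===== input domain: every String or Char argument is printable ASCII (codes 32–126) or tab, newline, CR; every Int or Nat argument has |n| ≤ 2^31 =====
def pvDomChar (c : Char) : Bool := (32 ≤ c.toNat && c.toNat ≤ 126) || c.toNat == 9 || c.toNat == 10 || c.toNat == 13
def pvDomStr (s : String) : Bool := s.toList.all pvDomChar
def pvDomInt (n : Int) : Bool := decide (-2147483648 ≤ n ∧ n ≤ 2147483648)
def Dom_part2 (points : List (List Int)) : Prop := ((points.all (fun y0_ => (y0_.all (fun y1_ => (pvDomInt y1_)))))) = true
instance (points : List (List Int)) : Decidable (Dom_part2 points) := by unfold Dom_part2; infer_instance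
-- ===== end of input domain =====

-- B inverts A's loop nesting: it builds the candidate-rectangle list once and lets each polygon
-- edge filter the surviving candidates, instead of A's per-pair rescan of all edges.

-- ===== PORT A =====
-- Python tuple '<' on int tuples (lexicographic, a shorter prefix is smaller)
def pyLt : List Int → List Int → Bool
  | [], [] => false
  | [], _ :: _ => true
  | _ :: _, [] => false
  | a :: as, b :: bs => if a < b then true else if b < a then false else pyLt as bs

-- Python tuple '>'
def pyGt (a b : List Int) : Bool := pyLt b a

-- itertools.combinations(points, 2), in order
def comb2 : List (List Int) → List (List Int × List Int)
  | [] => []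
  | x :: xs => xs.map (fun y => (x, y)) ++ comb2 xs

-- body of A's inner edge loop at index i (false where A 'continue's, true where A 'break's);
-- list indexing uses getD with a junk default: inside Pre_ the indices are always in range
def edgeHit (points : List (List Int)) (le re te be : Int) (i : Nat) : Bool :=
  let p1 := points.getD i []
  let p2 := points.getD ((i + 1) % points.length) []
  if pyGt p1 p2 then false
  else !(decide (max (p1.getD 0 0) (p2.getD 0 0) ≤ le) ||
         decide (re ≤ min (p1.getD 0 0) (p2.getD 0 0)) ||
         decide (max (p1.getD 1 0) (p2.getD 1 0) ≤ te) ||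
         decide (be ≤ min (p1.getD 1 0) (p2.getD 1 0)))

-- body of A's outer pair loop (the for-else encoded as 'broke')
def stepA (points : List (List Int)) (maxArea : Int) (pr : List Int × List Int) : Int :=
  let a := pr.1
  let b := pr.2
  if pyGt a b then maxArea
  else
    let le := min (a.getD 0 0) (b.getD 0 0)
    let re := max (a.getD 0 0) (b.getD 0 0)
    let te := min (a.getD 1 0) (b.getD 1 0)
    let be := max (a.getD 1 0) (b.getD 1 0)
    let broke := (List.range points.length).foldl
      (fun found i => found || edgeHit points le re te be i) false
    if broke then maxArea
    else max maxArea ((|a.getD 0 0 - b.getD 0 0| + 1) * (|a.getD 1 0 - b.getD 1 0| + 1))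

def part2 (points : List (List Int)) : Int :=
  (comb2 points).foldl (stepA points) 0

-- ===== PORT B =====
-- the candidate tuple (left, right, top, bottom, area) appended by Source B
def mkRect (a b : List Int) : Int × Int × Int × Int × Int :=
  (min (a.getD 0 0) (b.getD 0 0), max (a.getD 0 0) (b.getD 0 0),
   min (a.getD 1 0) (b.getD 1 0), max (a.getD 1 0) (b.getD 1 0),
   (|a.getD 0 0 - b.getD 0 0| + 1) * (|a.getD 1 0 - b.getD 1 0| + 1))

-- Source B's nested candidate-building loops (each point with every later point)
def buildRects : List (List Int) → List (Int × Int × Int × Int × Int)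
  | [] => []
  | a :: rest =>
      rest.filterMap (fun b => if pyGt a b then none else some (mkRect a b)) ++ buildRects rest

-- Source B's edge-loop 'continue' test: edge i runs backwards
def skipP (points : List (List Int)) (i : Nat) : Bool :=
  pyGt (points.getD i []) (points.getD ((i + 1) % points.length) [])

-- Source B's list-comprehension condition: candidate r survives edge i
def keepRect (points : List (List Int)) (i : Nat) (r : Int × Int × Int × Int × Int) : Bool :=
  let p := points.getD i []
  let q := points.getD ((i + 1) % points.length) []
  decide (max (p.getD 0 0) (q.getD 0 0) ≤ r.1) ||
  decide (r.2.1 ≤ min (p.getD 0 0) (q.getD 0 0)) ||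
  decide (max (p.getD 1 0) (q.getD 1 0) ≤ r.2.2.1) ||
  decide (r.2.2.2.1 ≤ min (p.getD 1 0) (q.getD 1 0))

-- one iteration of Source B's edge loop: skip the edge or filter the surviving candidates
def edgeStep (points : List (List Int)) (rs : List (Int × Int × Int × Int × Int)) (i : Nat) :
    List (Int × Int × Int × Int × Int) :=
  if skipP points i then rs else rs.filter (keepRect points i)

def part2_alt (points : List (List Int)) : Int :=
  let rects := buildRects points
  if rects.isEmpty then 0
  else
    match (List.range points.length).foldl (edgeStep points) rects with
    | [] => 0
    | r :: rs => rs.foldl (fun m r' => max m r'.2.2.2.2) r.2.2.2.2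

-- ===== PRECONDITION & SPEC =====
-- Pre_ excludes lists of ≥ 2 non-descending points containing a point with fewer than 2
-- coordinates: there the Python A generally raises IndexError, and where it still returns 0 it
-- is only because its break happens to fire before the short point is indexed (B may raise there).
def Pre_part2 (points : List (List Int)) : Prop :=
  points.length ≤ 1 ∨ (∀ p ∈ points, 2 ≤ p.length)
    ∨ List.Pairwise (fun a b => pyGt a b = true) points
instance (points : List (List Int)) : Decidable (Pre_part2 points) := by unfold Pre_part2; infer_instance
def pvWitness_part2 : List (List Int) := [[0, 0], [2, 3]]

def Spec_part2 (points : List (List Int)) (out : Int) : Prop := out = part2_alt points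
instance (points : List (List Int)) (out : Int) : Decidable (Spec_part2 points out) := by unfold Spec_part2; infer_instance

-- ===== CLAIM (what is proved, stated in full; the proofs are below) =====
def Claim_equal_part2 : Prop := ∀ (points : List (List Int)), Dom_part2 points → Pre_part2 points → Spec_part2 points (part2 points)

-- ===== LEMMAS AND PROOFS =====

-- candidate r survives every edge of the index list l (instantiated at l = range n)
def keepAll (points : List (List Int)) (l : List Nat) (r : Int × Int × Int × Int × Int) : Bool :=
  l.all (fun i => skipP points i || keepRect points i r)

-- the per-pair outcome of A, phrased as the optional surviving rectangle of B
def gB (points : List (List Int)) (pr : List Int × List Int) : Option (Int × Int × Int × Int × Int) :=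
  if pyGt pr.1 pr.2 then none
  else if keepAll points (List.range points.length) (mkRect pr.1 pr.2) then some (mkRect pr.1 pr.2)
  else none

theorem foldl_or_any (f : Nat → Bool) (l : List Nat) (b : Bool) :
    l.foldl (fun acc i => acc || f i) b = (b || l.any f) := by
  induction l generalizing b with
  | nil => simp
  | cons i is ih => simp [List.foldl_cons, ih, Bool.or_assoc]

theorem foldl_edgeStep (points : List (List Int)) (l : List Nat)
    (init : List (Int × Int × Int × Int × Int)) :
    l.foldl (edgeStep points) init = init.filter (keepAll points l) := by
  induction l generalizing init with
  | nil =>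
    symm
    rw [List.foldl_nil]
    refine List.filter_eq_self.mpr (fun r _ => ?_)
    simp [keepAll]
  | cons i is ih =>
    rw [List.foldl_cons, ih]
    unfold edgeStep
    by_cases h : skipP points i = true
    · simp only [h, if_pos]
      exact (List.filter_congr (fun r _ => by simp [keepAll, h])).symm
    · rw [Bool.not_eq_true] at h
      simp only [h, Bool.false_eq_true, ite_false]
      rw [List.filter_filter]
      exact (List.filter_congr (fun r _ => by simp [keepAll, h, Bool.and_comm])).symm

theorem edgeHit_eq_not_keep (points : List (List Int)) (a b : List Int) (i : Nat) :
    edgeHit points (min (a.getD 0 0) (b.getD 0 0)) (max (a.getD 0 0) (b.getD 0 0))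
      (min (a.getD 1 0) (b.getD 1 0)) (max (a.getD 1 0) (b.getD 1 0)) i
      = !(skipP points i || keepRect points i (mkRect a b)) := by
  unfold edgeHit skipP keepRect mkRect
  by_cases h : pyGt (points.getD i []) (points.getD ((i + 1) % points.length) []) = true
  · simp [h]
  · rw [Bool.not_eq_true] at h
    simp [h]

theorem stepA_eq (points : List (List Int)) (m : Int) (pr : List Int × List Int) :
    stepA points m pr = (match gB points pr with
      | none => m
      | some r => max m r.2.2.2.2) := by
  unfold stepA gB
  by_cases hgt : pyGt pr.1 pr.2 = true
  · simp [hgt]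
  · rw [Bool.not_eq_true] at hgt
    have hb : (List.range points.length).foldl
        (fun found i => found || edgeHit points (min (pr.1.getD 0 0) (pr.2.getD 0 0))
          (max (pr.1.getD 0 0) (pr.2.getD 0 0)) (min (pr.1.getD 1 0) (pr.2.getD 1 0))
          (max (pr.1.getD 1 0) (pr.2.getD 1 0)) i) false
        = !(keepAll points (List.range points.length) (mkRect pr.1 pr.2)) := by
      rw [foldl_or_any, Bool.false_or, keepAll, List.not_all_eq_any_not]
      exact List.any_congr rfl (fun i => edgeHit_eq_not_keep points pr.1 pr.2 i)
    simp only [hgt, Bool.false_eq_true, ite_false]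
    rw [hb]
    by_cases hk : keepAll points (List.range points.length) (mkRect pr.1 pr.2) = true
    · simp only [hk, Bool.not_true, Bool.false_eq_true, ite_false, ite_true]
      rfl
    · rw [Bool.not_eq_true] at hk
      simp [hk]

theorem part2_foldl_eq (points : List (List Int)) (l : List (List Int × List Int)) (m : Int) :
    l.foldl (stepA points) m
      = (l.filterMap (gB points)).foldl (fun acc r => max acc r.2.2.2.2) m := by
  induction l generalizing m with
  | nil => simp
  | cons pr prs ih =>
    rw [List.foldl_cons, List.filterMap_cons, stepA_eq]
    cases hg : gB points pr with
    | none => exact ih m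
    | some r => rw [List.foldl_cons]; exact ih _

theorem mem_buildRects_area_nonneg (points : List (List Int)) (r : Int × Int × Int × Int × Int)
    (h : r ∈ buildRects points) : 0 ≤ r.2.2.2.2 := by
  induction points with
  | nil => simp [buildRects] at h
  | cons a rest ih =>
    rw [buildRects, List.mem_append] at h
    rcases h with h | h
    · obtain ⟨b, -, hpr⟩ := List.mem_filterMap.mp h
      by_cases hgt : pyGt a b = true
      · simp [hgt] at hpr
      · rw [Bool.not_eq_true] at hgt
        simp only [hgt, Bool.false_eq_true, ite_false, Option.some.injEq] at hpr
        subst hpr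
        unfold mkRect
        positivity
    · exact ih h

theorem buildRects_eq (l : List (List Int)) :
    buildRects l = (comb2 l).filterMap
      (fun pr => if pyGt pr.1 pr.2 then none else some (mkRect pr.1 pr.2)) := by
  induction l with
  | nil => simp [buildRects, comb2]
  | cons a rest ih =>
    simp [buildRects, comb2, ih, List.filterMap_append, List.filterMap_map]

theorem filter_keepAll_buildRects (points : List (List Int)) :
    (buildRects points).filter (keepAll points (List.range points.length))
      = (comb2 points).filterMap (gB points) := by
  rw [buildRects_eq, List.filter_filterMap]
  apply List.filterMap_congr
  intro pr _
  by_cases hgt : pyGt pr.1 pr.2 = true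
  · simp [hgt, gB]
  · rw [Bool.not_eq_true] at hgt
    simp [hgt, gB, Option.filter_some]

-- ===== VERDICT (by name: the statement is the Claim_ definition above) =====
theorem part2_spec : Claim_equal_part2 := by
  intro points _ _
  unfold Spec_part2 part2
  rw [part2_foldl_eq, ← filter_keepAll_buildRects]
  unfold part2_alt
  by_cases he : (buildRects points).isEmpty = true
  · rw [List.isEmpty_iff] at he
    simp [he]
  · rw [Bool.not_eq_true] at he
    simp only [he, Bool.false_eq_true, ite_false, foldl_edgeStep]
    cases hc : (buildRects points).filter (keepAll points (List.range points.length)) with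
    | nil => simp
    | cons r rs =>
      have hrmem : r ∈ buildRects points :=
        (List.mem_filter.mp (hc ▸ List.mem_cons_self)).1
      have hnn : 0 ≤ r.2.2.2.2 := mem_buildRects_area_nonneg points r hrmem
      rw [List.foldl_cons, Int.max_eq_right hnn]
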